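-- pv_equiv track=rewrite | github.com/nikita-petrashen/yandex_algs | good_strings/main.py | convert_to_good_string
-- ===== SOURCE A (Python) =====
-- class Node:
--     def __init__(self, c):
--         self.c = c
--         self.next = None
--         self.prev = None
--
-- def string_to_linked_list(s):
--     head = Node(s[0])
--     cur = head
--     for i in range(1, len(s)):
--         nxt = Node(s[i])
--         cur.next = nxt
--         nxt.prev = cur
--         cur = nxt
--
--     return head
--
-- def linked_list_to_string(head):
--     s = ""
--     while head is not None:
--         s += head.c
--         head = head.next
--
--     return s
--
-- def convert_to_good_string(s: str) -> str:
--     if len(s) == 0 or len(s) == 1: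
--         return s
--     head = string_to_linked_list(s)
--     cur = head
--     while cur is not None and cur.next is not None:
--         if cur.c != cur.next.c and cur.c.lower() == cur.next.c.lower():
--             if cur.prev is None and cur.next.next is None:
--                 return ""
--             else:
--                 if cur.prev is None:
--                     cur.next.next.prev = None
--                     cur = cur.next.next
--                     head = cur
--                 elif cur.next.next is None:
--                     cur.prev.next = None
--                     break
--                 else:
--                     cur.prev.next = cur.next.next
--                     cur.next.next.prev = cur.prev
--                     cur = cur.prev
--         else:
--             cur = cur.next
--     result = linked_list_to_string(head)
--
--     return result
-- ===== SOURCE B (Python) =====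
-- def convert_to_good_string(s: str) -> str:
--     if len(s) <= 1:
--         return s
--     stack = []
--     for c in s:
--         if stack and stack[-1] != c and stack[-1].lower() == c.lower():
--             stack.pop()
--         else:
--             stack.append(c)
--     return "".join(stack)
-- ===== Notes on version B (the rewrite author's own statement) =====
-- stated objective: simpler
-- what changed: Replaced the doubly-linked-list with backtracking cursor (and its quadratic '+=' string rebuild) by a single forward pass maintaining a stack, joined once at the end.
import Mathlib
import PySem

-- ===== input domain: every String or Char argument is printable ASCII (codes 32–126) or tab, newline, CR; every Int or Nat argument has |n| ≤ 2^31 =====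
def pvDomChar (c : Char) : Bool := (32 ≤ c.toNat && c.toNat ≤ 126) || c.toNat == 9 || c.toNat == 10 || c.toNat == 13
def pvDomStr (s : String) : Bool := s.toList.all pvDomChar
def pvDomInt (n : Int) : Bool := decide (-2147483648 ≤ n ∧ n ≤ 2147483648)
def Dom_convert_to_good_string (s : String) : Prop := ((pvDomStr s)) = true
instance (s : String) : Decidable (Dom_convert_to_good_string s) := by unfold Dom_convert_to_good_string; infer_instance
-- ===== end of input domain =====

-- B replaces A's doubly-linked-list-with-backtracking-cursor by a single forward pass
-- with a stack (objective: simpler).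

-- ===== PORT A =====
-- 'c != d and c.lower() == d.lower()' (exact on the ASCII domain: Char.toLower = str.lower there)
def pvCancel (a b : Char) : Bool := (a != b) && (a.toLower == b.toLower)

-- A's doubly linked list with cursor, represented as a zipper: `left` is the reversed
-- list of nodes strictly before `cur`, `right` is the list from `cur` onward; each
-- branch of A's while-loop is transcribed on this state.
def pvLoopA (left right : List Char) : List Char :=
  match left, right with
  | _, [] => left.reverse                    -- cur is None: linked_list_to_string(head)
  | _, [c] => left.reverse ++ [c]            -- cur.next is None: linked_list_to_string(head)
  | [], c1 :: c2 :: rest =>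
    if pvCancel c1 c2 then
      match rest with
      | [] => []                             -- cur.prev is None and cur.next.next is None: return ""
      | r0 :: rs => pvLoopA [] (r0 :: rs)    -- cur.prev is None: drop the pair, head moves on
    else pvLoopA [c1] (c2 :: rest)           -- cur = cur.next
  | l :: ls, c1 :: c2 :: rest =>
    if pvCancel c1 c2 then
      match rest with
      | [] => (l :: ls).reverse              -- cur.next.next is None: cut the pair off, break
      | r0 :: rs => pvLoopA ls (l :: r0 :: rs)   -- unlink the pair, cur = cur.prev
    else pvLoopA (c1 :: l :: ls) (c2 :: rest)   -- cur = cur.next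
  termination_by left.length + 2 * right.length
  decreasing_by all_goals (simp; try omega)

def convert_to_good_string (s : String) : String :=
  if s.length = 0 ∨ s.length = 1 then s
  else String.ofList (pvLoopA [] s.toList)

-- ===== PORT B =====
-- one step of B's loop body; the stack is kept top-first, reversed by ''.join at the end
def pvStep (stack : List Char) (c : Char) : List Char :=
  match stack with
  | [] => [c]
  | t :: rest => if pvCancel t c then rest else c :: t :: rest

def convert_to_good_string_alt (s : String) : String :=
  if s.length ≤ 1 then s
  else String.ofList ((s.toList.foldl pvStep []).reverse)

-- ===== PRECONDITION & SPEC =====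
def Spec_convert_to_good_string (s : String) (out : String) : Prop := out = convert_to_good_string_alt s
instance (s : String) (out : String) : Decidable (Spec_convert_to_good_string s out) := by unfold Spec_convert_to_good_string; infer_instance

-- ===== CLAIM (what is proved, stated in full; the proofs are below) =====
def Claim_equal_convert_to_good_string : Prop := ∀ (s : String), Dom_convert_to_good_string s → Spec_convert_to_good_string s (convert_to_good_string s)

-- ===== LEMMAS AND PROOFS =====

-- Loop invariant: no adjacent pair of the (string-ordered) prefix `right.head :: left` cancels.
def pvInv (left right : List Char) : Prop :=
  ∀ c r, right = c :: r → List.IsChain (fun a b => pvCancel b a = false) (c :: left)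

lemma pvStep_push (ls : List Char) (c : Char)
    (h : List.IsChain (fun a b => pvCancel b a = false) (c :: ls)) :
    pvStep ls c = c :: ls := by
  cases ls with
  | nil => rfl
  | cons t ts =>
    have := (List.isChain_cons_cons.mp h).1
    simp [pvStep, this]

lemma pvLoopA_eq_foldl (left right : List Char) (h : pvInv left right) :
    pvLoopA left right = (right.foldl pvStep left).reverse := by
  fun_induction pvLoopA left right with
  | case1 left => simp
  | case2 left c =>
    simp [List.foldl, pvStep_push left c (h c [] rfl)]
  | case3 c1 c2 hc =>
    -- left = [], cancel, rest = []
    simp [List.foldl, pvStep, hc]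
  | case4 c1 c2 hc r0 rs ih =>
    -- left = [], cancel, rest ≠ []
    have heq : ((c1 :: c2 :: r0 :: rs).foldl pvStep ([] : List Char))
        = (r0 :: rs).foldl pvStep [] := by
      simp [List.foldl, pvStep, hc]
    rw [heq]
    exact ih (fun c r hr => by cases hr; exact List.IsChain.singleton _)
  | case5 c1 c2 rest hc ih =>
    -- left = [], no cancel
    have hcf : pvCancel c1 c2 = false := by simpa using hc
    simp only [List.foldl]
    have hs : pvStep ([] : List Char) c1 = [c1] := rfl
    rw [hs]
    exact ih (fun c r hr => by
      cases hr
      exact List.isChain_cons_cons.mpr ⟨hcf, List.IsChain.singleton _⟩)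
  | case6 l ls c1 c2 hc =>
    -- cancel, rest = []: cut and break
    have hch := h c1 [c2] rfl
    have h1 : pvCancel l c1 = false := (List.isChain_cons_cons.mp hch).1
    simp [List.foldl, pvStep, h1, hc]
  | case7 l ls c1 c2 hc r0 rs ih =>
    -- cancel, rest ≠ []: unlink the pair, step back
    have hch := h c1 (c2 :: r0 :: rs) rfl
    have h1 : pvCancel l c1 = false := (List.isChain_cons_cons.mp hch).1
    have htail : List.IsChain (fun a b => pvCancel b a = false) (l :: ls) :=
      (List.isChain_cons_cons.mp hch).2
    have hA : ((c1 :: c2 :: r0 :: rs).foldl pvStep (l :: ls))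
        = (r0 :: rs).foldl pvStep (l :: ls) := by
      simp [List.foldl, pvStep, h1, hc]
    have hB : ((l :: r0 :: rs).foldl pvStep ls) = (r0 :: rs).foldl pvStep (l :: ls) := by
      simp [List.foldl, pvStep_push ls l htail]
    rw [hA, ih (fun c r hr => by cases hr; exact htail), hB]
  | case8 l ls c1 c2 rest hc ih =>
    -- no cancel: advance
    have hcf : pvCancel c1 c2 = false := by simpa using hc
    have hch := h c1 (c2 :: rest) rfl
    have hs : pvStep (l :: ls) c1 = c1 :: l :: ls := pvStep_push (l :: ls) c1 hch
    simp only [List.foldl]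
    rw [hs]
    exact ih (fun c r hr => by
      cases hr
      exact List.isChain_cons_cons.mpr ⟨hcf, hch⟩)

-- ===== VERDICT (by name: the statement is the Claim_ definition above) =====
theorem convert_to_good_string_spec : Claim_equal_convert_to_good_string := by
  intro s _
  unfold Spec_convert_to_good_string convert_to_good_string convert_to_good_string_alt
  by_cases hlen : s.length ≤ 1
  · have h01 : s.length = 0 ∨ s.length = 1 := by omega
    rw [if_pos h01, if_pos hlen]
  · have h01 : ¬ (s.length = 0 ∨ s.length = 1) := by omega
    rw [if_neg h01, if_neg hlen,
      pvLoopA_eq_foldl [] s.toList (fun c r hr => List.IsChain.singleton _)]
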